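-- pv_equiv track=rewrite | github.com/sparta02/coding-challenges | 251120/흥미로운 숫자 2/interesting-numbers-2.py | check
-- ===== SOURCE A (Python) =====
-- def check(x):
--     arr=[0]*10
--     s=str(x)
--     for i in s:
--         i=int(i)
--         arr[i]+=1
--     a=0
--     b=0
--     for i in arr:
--         if i>=2:
--             a+=1
--         if i==1:
--             b+=1
--
--     if a==1 and b==1:
--         return True
--     return False
-- ===== SOURCE B (Python) =====
-- def check(x):
--     rest = [int(c) for c in str(x)]
--     a = b = 0
--     while rest:
--         d = rest[0]
--         n = len(rest)
--         rest = [e for e in rest if e != d]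
--         k = n - len(rest)
--         if k >= 2:
--             a += 1
--         elif k == 1:
--             b += 1
--     return a == 1 and b == 1
-- ===== Notes on version B (the rewrite author's own statement) =====
-- stated objective: alternative
-- what changed: B drops A's ten-slot frequency array and its scan entirely: it turns the digits into a worklist and repeatedly strips ALL occurrences of the first remaining digit, tallying each stripped group's size into the two counters as it goes, so the multiset is consumed group by group instead of being histogrammed and then scanned.
import Mathlib
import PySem

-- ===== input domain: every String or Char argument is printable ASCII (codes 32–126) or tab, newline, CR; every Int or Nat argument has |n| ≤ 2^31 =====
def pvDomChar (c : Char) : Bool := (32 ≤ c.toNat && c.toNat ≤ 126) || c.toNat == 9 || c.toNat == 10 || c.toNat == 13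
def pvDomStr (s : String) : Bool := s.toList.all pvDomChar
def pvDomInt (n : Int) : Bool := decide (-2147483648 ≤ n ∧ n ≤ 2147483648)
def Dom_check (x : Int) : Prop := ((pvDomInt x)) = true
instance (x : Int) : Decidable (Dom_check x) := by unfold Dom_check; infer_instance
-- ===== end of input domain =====

-- B replaces A's ten-slot frequency array (histogram pass + array scan) by a worklist that
-- repeatedly strips all occurrences of the first remaining digit, tallying each group's size.
-- A raises ValueError on negative x; those inputs are outside Pre_check.

-- ===== PORT A =====
-- arr[i] += 1 at index i = int(c); int(c) raises ValueError on a non-digit char (only reachable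
-- for x < 0, which Pre_check excludes) — the port leaves arr unchanged there (totality guard).
def pvIncAt : List Int → Nat → List Int
  | [], _ => []
  | h :: t, 0 => (h + 1) :: t
  | h :: t, Nat.succ n => h :: pvIncAt t n

def check (x : Int) : Bool :=
  let s := (PySem.Int.toStr x).toList
  let arr := s.foldl (fun arr c => if c.isDigit then pvIncAt arr (c.toNat - 48) else arr)
      (List.replicate 10 (0 : Int))
  let ab := arr.foldl (fun (ab : Int × Int) i =>
      (if i ≥ 2 then ab.1 + 1 else ab.1, if i = 1 then ab.2 + 1 else ab.2)) (0, 0)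
  if ab.1 = 1 ∧ ab.2 = 1 then true else false

-- ===== PORT B =====
-- int(c) of a digit char is c.toNat - 48 (ValueError on non-digits is only reachable for x < 0,
-- outside Pre_check — the port's Nat subtraction is a totality guard there).
def pvVal (c : Char) : Int := ((c.toNat - 48 : Nat) : Int)

-- B's while loop: strip ALL copies of the first remaining element, tally the group's size k.
def pvStrip (rest : List Int) (ab : Int × Int) : Int × Int :=
  match rest with
  | [] => ab
  | d :: t =>
      let rest' := (d :: t).filter (fun e => e != d)
      let k : Int := (((d :: t).length - rest'.length : Nat) : Int)
      pvStrip rest' (if k ≥ 2 then (ab.1 + 1, ab.2) else if k = 1 then (ab.1, ab.2 + 1) else ab)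
termination_by rest.length
decreasing_by
  simp only [List.filter_cons, bne_self_eq_false, Bool.false_eq_true, if_false, List.length_cons]
  exact Nat.lt_succ_of_le (List.length_filter_le _ t)

def check_alt (x : Int) : Bool :=
  let rest := (PySem.Int.toStr x).toList.map pvVal
  let ab := pvStrip rest (0, 0)
  decide (ab.1 = 1 ∧ ab.2 = 1)

-- ===== PRECONDITION & SPEC =====
-- Pre_check excludes negative x, on which A raises ValueError (int of the '-' sign in its first loop).
def Pre_check (x : Int) : Prop := 0 ≤ x
instance (x : Int) : Decidable (Pre_check x) := by unfold Pre_check; infer_instance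
def pvWitness_check : Int := 122

def Spec_check (x : Int) (out : Bool) : Prop := out = check_alt x
instance (x : Int) (out : Bool) : Decidable (Spec_check x out) := by unfold Spec_check; infer_instance

-- ===== CLAIM (what is proved, stated in full; the proofs are below) =====
def Claim_equal_check : Prop := ∀ (x : Int), Dom_check x → Pre_check x → Spec_check x (check x)

-- ===== LEMMAS AND PROOFS =====

theorem pvIsDigit_eq (c : Char) : c.isDigit = (48 ≤ c.toNat && c.toNat ≤ 57) := by
  rcases c with ⟨⟨⟨v, hv⟩⟩, h⟩
  simp only [Char.isDigit, Char.toNat, UInt32.le_iff_toNat_le, UInt32.toNat]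
  rfl

-- str(x) for x ≥ 0 consists of digit characters only
theorem pvDigitChar_isDigit (m : Nat) (h : m < 10) : (Nat.digitChar m).isDigit = true := by
  interval_cases m <;> decide

theorem pvToDigitsCore_digit : ∀ (fuel n : Nat) (l : List Char),
    (∀ c ∈ l, c.isDigit = true) → ∀ c ∈ Nat.toDigitsCore 10 fuel n l, c.isDigit = true := by
  intro fuel
  induction fuel with
  | zero => intro n l hl; simpa [Nat.toDigitsCore] using hl
  | succ f ih =>
    intro n l hl
    simp only [Nat.toDigitsCore]
    have hd : ∀ c ∈ (n % 10).digitChar :: l, c.isDigit = true := by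
      intro c hc
      rcases List.mem_cons.mp hc with h | h
      · subst h; exact pvDigitChar_isDigit _ (Nat.mod_lt _ (by norm_num))
      · exact hl c h
    split
    · exact hd
    · exact ih (n / 10) _ hd

theorem pvChars_digit (x : Int) (hx : 0 ≤ x) :
    ∀ c ∈ (PySem.Int.toStr x).toList, c.isDigit = true := by
  rw [PySem.Int.toList_toStr]
  unfold PySem.Int.toChars
  rw [if_neg (by omega)]
  exact pvToDigitsCore_digit _ _ [] (by simp)

theorem pvLength_incAt : ∀ (l : List Int) (j : Nat), (pvIncAt l j).length = l.length := by
  intro l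
  induction l with
  | nil => intro j; simp [pvIncAt]
  | cons h t ih => intro j; cases j <;> simp [pvIncAt, ih]

theorem pvGetD_incAt : ∀ (l : List Int) (j i : Nat),
    (pvIncAt l j).getD i 0 = if i = j ∧ j < l.length then l.getD i 0 + 1 else l.getD i 0 := by
  intro l
  induction l with
  | nil => intro j i; simp [pvIncAt]
  | cons h t ih =>
    intro j i
    cases j with
    | zero => cases i <;> simp [pvIncAt]
    | succ j' =>
      cases i with
      | zero => simp [pvIncAt]
      | succ i' => simpa [pvIncAt, Nat.succ_lt_succ_iff] using ih j' i'

theorem pvFoldArr_length : ∀ (s : List Char) (arr : List Int),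
    (s.foldl (fun arr c => if c.isDigit then pvIncAt arr (c.toNat - 48) else arr) arr).length
      = arr.length := by
  intro s
  induction s with
  | nil => intro arr; rfl
  | cons c s ih =>
    intro arr
    simp only [List.foldl_cons, ih]
    by_cases h : c.isDigit <;> simp [h, pvLength_incAt]

-- the frequency array after A's first loop: slot i holds the number of chars whose int() value is i
theorem pvFoldArr_getD : ∀ (s : List Char) (arr : List Int), arr.length = 10 → ∀ i : Nat, i < 10 →
    (s.foldl (fun arr c => if c.isDigit then pvIncAt arr (c.toNat - 48) else arr) arr).getD i 0
      = arr.getD i 0 + (s.countP (fun c => c.isDigit && (c.toNat - 48 == i)) : Int) := by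
  intro s
  induction s with
  | nil => intro arr _ i _; simp
  | cons c s ih =>
    intro arr hlen i hi
    simp only [List.foldl_cons, List.countP_cons]
    by_cases h : c.isDigit
    · have hidx : c.toNat - 48 < 10 := by
        rw [pvIsDigit_eq] at h; simp at h; omega
      simp only [h, if_true]
      rw [ih (pvIncAt arr (c.toNat - 48)) (by rw [pvLength_incAt]; exact hlen) i hi]
      rw [pvGetD_incAt, hlen]
      by_cases he : i = c.toNat - 48
      · simp [he, hidx]
        ring
      · have : ¬ (c.toNat - 48 == i) = true := by simp; omega
        simp [he, this]
    · simp [h]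
      exact ih arr hlen i hi

-- A's second loop from (0,0): the pair of Int-casted countP's of the array entries
theorem pvFoldPair : ∀ (l : List Int) (a b : Int),
    l.foldl (fun (ab : Int × Int) i =>
        (if i ≥ 2 then ab.1 + 1 else ab.1, if i = 1 then ab.2 + 1 else ab.2)) (a, b)
      = (a + (l.countP (fun i => decide (2 ≤ i)) : Int),
         b + (l.countP (fun i => decide (i = 1)) : Int)) := by
  intro l
  induction l with
  | nil => intro a b; simp
  | cons h t ih =>
    intro a b
    simp only [List.foldl_cons, List.countP_cons]
    rw [ih]
    by_cases h1 : (2 : Int) ≤ h <;> by_cases h2 : h = 1 <;>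
      simp [h1, h2, ge_iff_le] <;> omega

-- B's strip loop from (a,b): the same two tallies, one per DISTINCT element, via dedup
theorem pvStrip_eq : ∀ (n : Nat) (rest : List Int), rest.length ≤ n → ∀ (a b : Int),
    pvStrip rest (a, b)
      = (a + (rest.dedup.countP (fun d => decide (2 ≤ rest.count d)) : Int),
         b + (rest.dedup.countP (fun d => decide (rest.count d = 1)) : Int)) := by
  intro n
  induction n with
  | zero =>
    intro rest hlen a b
    have : rest = [] := List.eq_nil_of_length_eq_zero (Nat.le_zero.mp hlen)
    subst this
    simp [pvStrip]
  | succ n ih =>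
    intro rest hlen a b
    match rest with
    | [] => simp [pvStrip]
    | d :: t =>
      rw [pvStrip]
      have hfilter : (d :: t).filter (fun e => e != d) = t.filter (fun e => e != d) := by
        simp
      set r : List Int := d :: t with hr
      set rest' : List Int := r.filter (fun e => e != d) with hrest'
      have hlen' : rest'.length ≤ n := by
        have h1 : rest'.length ≤ t.length := by
          rw [hfilter]; exact List.length_filter_le _ t
        have h2 : t.length + 1 ≤ n + 1 := by simpa [hr] using hlen
        omega
      -- the stripped group's size k is the count of d in r
      have hcl : rest'.length = r.countP (fun e => e != d) := by
        rw [hrest', List.countP_eq_length_filter]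
      have hsplit := List.length_eq_countP_add_countP (l := r) (p := fun e => e == d)
      have hnot : r.countP (fun a => decide (¬ (a == d) = true)) = r.countP (fun e => e != d) := by
        apply List.countP_congr; intro x _; simp [bne]
      have hk : r.length - rest'.length = r.count d := by
        rw [List.count_eq_countP, hcl, hsplit, hnot]; omega
      have hdpos : 1 ≤ r.count d := List.count_pos_iff.mpr (by simp [hr])
      -- counts of the surviving elements are unchanged by the strip
      have hcnt : ∀ e ∈ rest'.dedup, rest'.count e = r.count e := by
        intro e he
        have hne : e ≠ d := by
          have := List.mem_dedup.mp he
          rw [hrest'] at this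
          have := List.of_mem_filter this
          simpa using this
        rw [hrest', List.count_eq_countP, List.countP_filter, List.count_eq_countP]
        apply List.countP_congr
        intro x _
        constructor
        · intro h; exact (Bool.and_elim_left h)
        · intro h
          have hx : x = e := by simpa using h
          subst hx
          simp [hne]
      have hmem' : ∀ a : Int, a ∈ rest' ↔ a ∈ r ∧ a ≠ d := by
        intro a
        rw [hrest']
        simp [List.mem_filter]
      have hdnot : d ∉ rest'.dedup := fun hc =>
        (((hmem' d).mp (List.mem_dedup.mp hc)).2) rfl
      -- the distinct elements of r are d plus the distinct elements of rest'
      have hperm : r.dedup.Perm (d :: rest'.dedup) := by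
        rw [List.perm_ext_iff_of_nodup (List.nodup_dedup r) (by
          simpa [List.nodup_cons, hdnot] using List.nodup_dedup rest')]
        intro a
        simp only [List.mem_dedup, List.mem_cons]
        constructor
        · intro ha
          by_cases had : a = d
          · exact Or.inl had
          · exact Or.inr ((hmem' a).mpr ⟨ha, had⟩)
        · rintro (ha | ha)
          · subst ha; simp [hr]
          · exact ((hmem' a).mp ha).1
      have hcountP : ∀ p : Int → Bool,
          r.dedup.countP p = rest'.dedup.countP p + (if p d then 1 else 0) := by
        intro p
        rw [hperm.countP_eq, List.countP_cons]
      have hC2 : rest'.dedup.countP (fun e => decide (2 ≤ rest'.count e))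
          = rest'.dedup.countP (fun e => decide (2 ≤ r.count e)) := by
        apply List.countP_congr; intro e he; simp [hcnt e he]
      have hC1 : rest'.dedup.countP (fun e => decide (rest'.count e = 1))
          = rest'.dedup.countP (fun e => decide (r.count e = 1)) := by
        apply List.countP_congr; intro e he; simp [hcnt e he]
      rw [hk]
      have hk2 : ((r.count d : Nat) : Int) ≥ 2 ↔ 2 ≤ r.count d := by
        constructor <;> intro h <;> exact_mod_cast h
      have hk1 : ((r.count d : Nat) : Int) = 1 ↔ r.count d = 1 := by
        constructor <;> intro h <;> exact_mod_cast h
      by_cases h2 : 2 ≤ r.count d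
      · rw [if_pos (hk2.mpr h2)]
        rw [ih rest' hlen' (a + 1) b, hC2, hC1,
          hcountP (fun e => decide (2 ≤ r.count e)), hcountP (fun e => decide (r.count e = 1))]
        have hd1 : ¬ (r.count d = 1) := by omega
        simp [h2, hd1]
        ring
      · have h1 : r.count d = 1 := by omega
        rw [if_neg (fun hc => h2 (hk2.mp hc)), if_pos (hk1.mpr h1)]
        rw [ih rest' hlen' a (b + 1), hC2, hC1,
          hcountP (fun e => decide (2 ≤ r.count e)), hcountP (fun e => decide (r.count e = 1))]
        simp [h1]
        ring

-- a tally over the digits 0..9 equals the same tally over the distinct elements of rest,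
-- when the predicate forces membership and all elements lie in 0..9
theorem pvBridge (rest : List Int) (p : Int → Bool)
    (hp : ∀ e, p e = true → 1 ≤ rest.count e)
    (hr : ∀ e ∈ rest, 0 ≤ e ∧ e < 10) :
    (List.range 10).countP (fun j => p ((j : Nat) : Int)) = rest.dedup.countP p := by
  have hmap : (List.range 10).countP (fun j => p ((j : Nat) : Int))
      = ((List.range 10).map (fun j : Nat => (j : Int))).countP p := by
    rw [List.countP_map]; rfl
  rw [hmap]
  set L : List Int := (List.range 10).map (fun j : Nat => (j : Int)) with hL
  have hLnodup : L.Nodup :=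
    List.Nodup.map (fun a b h => by exact_mod_cast h) List.nodup_range
  have hstep1 : L.countP p = (L.filter (fun e => decide (e ∈ rest))).countP p := by
    rw [List.countP_filter]
    apply List.countP_congr
    intro e _
    constructor
    · intro h
      have : e ∈ rest := List.count_pos_iff.mp (hp e h)
      simp [h, this]
    · intro h; exact Bool.and_elim_left h
  rw [hstep1]
  have hperm : (L.filter (fun e => decide (e ∈ rest))).Perm rest.dedup := by
    rw [List.perm_ext_iff_of_nodup (hLnodup.filter _) (List.nodup_dedup rest)]
    intro a
    simp only [List.mem_filter, List.mem_dedup, decide_eq_true_eq]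
    constructor
    · exact fun h => h.2
    · intro ha
      refine ⟨?_, ha⟩
      rcases hr a ha with ⟨h0, h10⟩
      rw [hL]
      refine List.mem_map.mpr ⟨a.toNat, List.mem_range.mpr (by omega), by omega⟩
  exact hperm.countP_eq p

-- all values B works on lie in 0..9 (digit chars)
theorem pvVal_range (x : Int) (hx : 0 ≤ x) :
    ∀ e ∈ (PySem.Int.toStr x).toList.map pvVal, 0 ≤ e ∧ e < 10 := by
  intro e he
  rcases List.mem_map.mp he with ⟨c, hc, hce⟩
  have hd := pvChars_digit x hx c hc
  rw [pvIsDigit_eq] at hd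
  simp only [Bool.and_eq_true, decide_eq_true_eq] at hd
  subst hce
  unfold pvVal
  omega

-- the two ports agree on x ≥ 0
theorem pvCheck_eq (x : Int) (hx : 0 ≤ x) : check x = check_alt x := by
  unfold check check_alt
  dsimp only
  set cs := (PySem.Int.toStr x).toList with hcs
  have hd : ∀ c ∈ cs, c.isDigit = true := pvChars_digit x hx
  set rest : List Int := cs.map pvVal with hrest
  -- A's array, slot by slot
  have harr : cs.foldl (fun arr c => if c.isDigit then pvIncAt arr (c.toNat - 48) else arr)
      (List.replicate 10 (0 : Int))
      = (List.range 10).map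
          (fun j => ((cs.countP (fun c => c.isDigit && (c.toNat - 48 == j)) : Nat) : Int)) := by
    apply List.ext_getElem
    · simp [pvFoldArr_length]
    · intro i h1 h2
      have hi : i < 10 := by simpa [pvFoldArr_length] using h1
      rw [← List.getD_eq_getElem _ 0 h1, ← List.getD_eq_getElem _ 0 h2]
      rw [pvFoldArr_getD cs (List.replicate 10 0) (by simp) i hi]
      have hrep : (List.replicate 10 (0 : Int)).getD i 0 = 0 := by
        interval_cases i <;> rfl
      rw [hrep, List.getD_eq_getElem _ 0 h2]
      simp
  rw [harr, pvFoldPair, List.countP_map, List.countP_map]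
  -- its per-digit counts are the counts of the values in B's worklist
  have hcq : ∀ j : Nat, cs.countP (fun c => c.isDigit && (c.toNat - 48 == j))
      = rest.count ((j : Nat) : Int) := by
    intro j
    rw [hrest, List.count_eq_countP, List.countP_map]
    apply List.countP_congr
    intro c hc
    have hdc := hd c hc
    simp only [Function.comp, hdc, Bool.true_and, beq_iff_eq, pvVal]
    omega
  have hA2 : (List.range 10).countP
        ((fun i => decide (2 ≤ i)) ∘
          (fun j => ((cs.countP (fun c => c.isDigit && (c.toNat - 48 == j)) : Nat) : Int)))
      = (List.range 10).countP (fun j => decide (2 ≤ rest.count ((j : Nat) : Int))) := by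
    apply List.countP_congr
    intro j _
    simp only [Function.comp, hcq j, decide_eq_true_eq]
    constructor <;> intro h <;> exact_mod_cast h
  have hA1 : (List.range 10).countP
        ((fun i => decide (i = 1)) ∘
          (fun j => ((cs.countP (fun c => c.isDigit && (c.toNat - 48 == j)) : Nat) : Int)))
      = (List.range 10).countP (fun j => decide (rest.count ((j : Nat) : Int) = 1)) := by
    apply List.countP_congr
    intro j _
    simp only [Function.comp, hcq j, decide_eq_true_eq]
    constructor <;> intro h <;> exact_mod_cast h
  rw [hA2, hA1]
  rw [pvStrip_eq rest.length rest (Nat.le_refl _) 0 0]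
  have hrange : ∀ e ∈ rest, 0 ≤ e ∧ e < 10 := by rw [hrest, hcs]; exact pvVal_range x hx
  rw [pvBridge rest (fun e => decide (2 ≤ rest.count e)) (by intro e h; simp at h; omega) hrange,
    pvBridge rest (fun e => decide (rest.count e = 1)) (by intro e h; simp at h; omega) hrange]
  by_cases h : (0 + ((rest.dedup.countP (fun d => decide (2 ≤ rest.count d)) : Nat) : Int) = 1
      ∧ 0 + ((rest.dedup.countP (fun d => decide (rest.count d = 1)) : Nat) : Int) = 1) <;>
    simp [h]

-- ===== VERDICT (by name: the statement is the Claim_ definition above) =====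
theorem check_spec : Claim_equal_check := by
  intro x _ hx
  unfold Spec_check
  exact pvCheck_eq x hx
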